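-- pv_equiv track=rewrite | github.com/pypi-data/pypi-mirror-389 | packages/bfgcardplay/bfgcardplay-1.2.8.tar.gz/bfgcardplay-1.2.8/src/bfgcardplay/utilities.py | get_list_of_best_scores
-- ===== SOURCE A (Python) =====
-- def get_list_of_best_scores(candidates: dict[object, int],
--                             reverse: bool = False) -> list[object]:
--     """Return a list of the best scoring candidates
--     from a dict of candidates."""
--     best_candidates = []
--     (min_score, max_score) = _min_max_score(candidates, reverse)
--
--     for key, score in candidates.items():
--         if reverse:
--             if score == min_score:
--                 best_candidates.append(key)
--         else:
--             if score == max_score: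
--                 best_candidates.append(key)
--     return best_candidates
--
-- def _min_max_score(candidates: dict[object, int],
--                    reverse: bool = False) -> int:
--     """Return the maximum score from candidates."""
--     max_score = 0
--     min_score = 0
--     for key, score in candidates.items():
--         if score > max_score:
--             max_score = score
--
--     if reverse:
--         min_score = max_score
--         for key, score in candidates.items():
--             if score < min_score:
--                 min_score = score
--     return (min_score, max_score)
-- ===== SOURCE B (Python) =====
-- def get_list_of_best_scores(candidates: dict[object, int],
--                             reverse: bool = False) -> list[object]:
--     """Return a list of the best scoring candidates, in one pass."""
--     result = []
--     if reverse:
--         best = None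
--         for key, score in candidates.items():
--             if best is None or score < best:
--                 best = score
--                 result = [key]
--             elif score == best:
--                 result.append(key)
--     else:
--         best = 0
--         for key, score in candidates.items():
--             if score > best:
--                 best = score
--                 result = [key]
--             elif score == best:
--                 result.append(key)
--     return result
-- ===== Notes on version B (the rewrite author's own statement) =====
-- stated objective: simpler
-- what changed: Single pass maintaining the running extreme and its tied-key bucket together, instead of A's separate extreme-finding pass(es) followed by a refilter pass over the dict.
import Mathlib
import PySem

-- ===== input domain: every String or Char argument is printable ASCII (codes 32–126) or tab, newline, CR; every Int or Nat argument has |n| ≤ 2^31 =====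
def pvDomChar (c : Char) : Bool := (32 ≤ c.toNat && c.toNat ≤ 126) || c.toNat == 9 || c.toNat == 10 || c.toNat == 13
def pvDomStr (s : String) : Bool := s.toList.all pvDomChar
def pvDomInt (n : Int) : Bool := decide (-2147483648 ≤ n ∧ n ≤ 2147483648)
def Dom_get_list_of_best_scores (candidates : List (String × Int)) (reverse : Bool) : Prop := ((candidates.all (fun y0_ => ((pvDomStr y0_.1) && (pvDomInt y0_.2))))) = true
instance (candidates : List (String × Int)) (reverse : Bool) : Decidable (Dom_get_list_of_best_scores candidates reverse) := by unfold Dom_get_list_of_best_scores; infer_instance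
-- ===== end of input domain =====

-- B replaces A's find-extreme-then-refilter passes by ONE pass that maintains the
-- running extreme together with its tied-key bucket (objective: simpler).

-- ===== PORT A =====
-- helper _min_max_score, transliterated
def pv_min_max_score (candidates : List (String × Int)) (reverse : Bool) : Int × Int :=
  let max_score : Int := 0
  let min_score : Int := 0
  let max_score := candidates.foldl (fun m kv => if kv.2 > m then kv.2 else m) max_score
  let min_score :=
    if reverse then
      candidates.foldl (fun m kv => if kv.2 < m then kv.2 else m) max_score
    else min_score
  (min_score, max_score)

def get_list_of_best_scores (candidates : List (String × Int)) (reverse : Bool) : List String :=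
  let best_candidates : List String := []
  let mm := pv_min_max_score candidates reverse
  candidates.foldl (fun acc kv =>
    if reverse then
      (if kv.2 = mm.1 then acc ++ [kv.1] else acc)
    else
      (if kv.2 = mm.2 then acc ++ [kv.1] else acc)) best_candidates

-- ===== PORT B =====
-- the reverse=False loop of Source B: running best (starting at 0) and its bucket
def pvAltMaxLoop : List (String × Int) → Int → List String → List String
  | [], _, result => result
  | (key, score) :: rest, best, result =>
      if score > best then pvAltMaxLoop rest score [key]
      else if score = best then pvAltMaxLoop rest best (result ++ [key])
      else pvAltMaxLoop rest best result

-- the reverse=True loop of Source B: running best starts as None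
def pvAltMinLoop : List (String × Int) → Option Int → List String → List String
  | [], _, result => result
  | (key, score) :: rest, best, result =>
      match best with
      | none => pvAltMinLoop rest (some score) [key]
      | some b =>
          if score < b then pvAltMinLoop rest (some score) [key]
          else if score = b then pvAltMinLoop rest (some b) (result ++ [key])
          else pvAltMinLoop rest (some b) result

def get_list_of_best_scores_alt (candidates : List (String × Int)) (reverse : Bool) : List String :=
  if reverse then pvAltMinLoop candidates none []
  else pvAltMaxLoop candidates 0 []

-- ===== PRECONDITION & SPEC =====
def Spec_get_list_of_best_scores (candidates : List (String × Int)) (reverse : Bool) (out : List String) : Prop := out = get_list_of_best_scores_alt candidates reverse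
instance (candidates : List (String × Int)) (reverse : Bool) (out : List String) : Decidable (Spec_get_list_of_best_scores candidates reverse out) := by unfold Spec_get_list_of_best_scores; infer_instance

-- ===== CLAIM (what is proved, stated in full; the proofs are below) =====
def Claim_equal_get_list_of_best_scores : Prop := ∀ (candidates : List (String × Int)) (reverse : Bool), Dom_get_list_of_best_scores candidates reverse → Spec_get_list_of_best_scores candidates reverse (get_list_of_best_scores candidates reverse)

-- ===== LEMMAS AND PROOFS =====

-- abbreviations for A's two extreme folds
def pvFmax (l : List (String × Int)) (b : Int) : Int :=
  l.foldl (fun m kv => if kv.2 > m then kv.2 else m) b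
def pvFmin (l : List (String × Int)) (b : Int) : Int :=
  l.foldl (fun m kv => if kv.2 < m then kv.2 else m) b

theorem pvFmax_le_init (l : List (String × Int)) (b : Int) : b ≤ pvFmax l b := by
  induction l generalizing b with
  | nil => simp [pvFmax]
  | cons x rest ih =>
      simp only [pvFmax, List.foldl_cons]
      split
      · exact le_trans (by omega) (ih x.2)
      · exact ih b

theorem pvFmin_le_init (l : List (String × Int)) (b : Int) : pvFmin l b ≤ b := by
  induction l generalizing b with
  | nil => simp [pvFmin]
  | cons x rest ih =>
      simp only [pvFmin, List.foldl_cons]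
      split
      · exact le_trans (ih x.2) (by omega)
      · exact ih b

theorem pvFmax_ge_mem (l : List (String × Int)) (b : Int) (x : String × Int) (hx : x ∈ l) :
    x.2 ≤ pvFmax l b := by
  induction l generalizing b with
  | nil => cases hx
  | cons y rest ih =>
      simp only [pvFmax, List.foldl_cons]
      rcases List.mem_cons.mp hx with h | h
      · subst h
        split
        · exact pvFmax_le_init rest x.2
        · exact le_trans (by omega) (pvFmax_le_init rest b)
      · split <;> exact ih _ h

-- A's loop builds the filtered key list
theorem pvA_loop_eq (l : List (String × Int)) (m : Int) (acc : List String) :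
    l.foldl (fun acc kv => if kv.2 = m then acc ++ [kv.1] else acc) acc
      = acc ++ (l.filter (fun kv => kv.2 = m)).map Prod.fst := by
  induction l generalizing acc with
  | nil => simp
  | cons x rest ih =>
      simp only [List.foldl_cons, List.filter_cons]
      by_cases h : x.2 = m
      · simp [h, ih]
      · simp [h, ih]

-- B's max loop state invariant
theorem pvAltMaxLoop_eq (l : List (String × Int)) (b : Int) (res : List String) :
    pvAltMaxLoop l b res
      = (if pvFmax l b = b then res else [])
        ++ (l.filter (fun kv => kv.2 = pvFmax l b)).map Prod.fst := by
  induction l generalizing b res with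
  | nil => simp [pvAltMaxLoop, pvFmax]
  | cons x rest ih =>
      have hfold : pvFmax (x :: rest) b
          = if x.2 > b then pvFmax rest x.2 else pvFmax rest b := by
        simp only [pvFmax, List.foldl_cons]; split <;> rfl
      simp only [pvAltMaxLoop, List.filter_cons]
      by_cases h1 : x.2 > b
      · have hM : pvFmax (x :: rest) b = pvFmax rest x.2 := by rw [hfold, if_pos h1]
        have hMx : x.2 ≤ pvFmax rest x.2 := pvFmax_le_init rest x.2
        rw [if_pos h1, ih, hM]
        have hMb : pvFmax rest x.2 ≠ b := by omega
        rw [if_neg hMb]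
        by_cases h2 : x.2 = pvFmax rest x.2
        · rw [if_pos h2.symm]
          simp [← h2]
        · rw [if_neg (fun hh => h2 hh.symm)]
          simp [h2]
      · have hM : pvFmax (x :: rest) b = pvFmax rest b := by rw [hfold, if_neg h1]
        rw [if_neg h1]
        by_cases h2 : x.2 = b
        · rw [if_pos h2, ih, hM]
          by_cases h3 : pvFmax rest b = b
          · have hx : x.2 = pvFmax rest b := by omega
            simp [h3, hx]
          · have hx : ¬ (x.2 = pvFmax rest b) := by omega
            simp [h3, hx]
        · rw [if_neg h2, ih, hM]
          have hx : ¬ (x.2 = pvFmax rest b) := by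
            have := pvFmax_le_init rest b
            omega
          simp [hx]

-- B's min loop state invariant (some-state)
theorem pvAltMinLoop_eq (l : List (String × Int)) (b : Int) (res : List String) :
    pvAltMinLoop l (some b) res
      = (if pvFmin l b = b then res else [])
        ++ (l.filter (fun kv => kv.2 = pvFmin l b)).map Prod.fst := by
  induction l generalizing b res with
  | nil => simp [pvAltMinLoop, pvFmin]
  | cons x rest ih =>
      have hfold : pvFmin (x :: rest) b
          = if x.2 < b then pvFmin rest x.2 else pvFmin rest b := by
        simp only [pvFmin, List.foldl_cons]; split <;> rfl
      have hinit : ∀ (l' : List (String × Int)) (c : Int), pvFmin l' c ≤ c := by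
        intro l' c
        induction l' generalizing c with
        | nil => simp [pvFmin]
        | cons y r ihr =>
            simp only [pvFmin, List.foldl_cons]
            split
            · exact le_trans (ihr y.2) (by omega)
            · exact ihr c
      simp only [pvAltMinLoop, List.filter_cons]
      by_cases h1 : x.2 < b
      · have hM : pvFmin (x :: rest) b = pvFmin rest x.2 := by rw [hfold, if_pos h1]
        have hMx : pvFmin rest x.2 ≤ x.2 := hinit rest x.2
        rw [if_pos h1, ih, hM]
        have hMb : pvFmin rest x.2 ≠ b := by omega
        rw [if_neg hMb]
        by_cases h2 : x.2 = pvFmin rest x.2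
        · rw [if_pos h2.symm]
          simp [← h2]
        · rw [if_neg (fun hh => h2 hh.symm)]
          simp [h2]
      · have hM : pvFmin (x :: rest) b = pvFmin rest b := by rw [hfold, if_neg h1]
        rw [if_neg h1]
        by_cases h2 : x.2 = b
        · rw [if_pos h2, ih, hM]
          by_cases h3 : pvFmin rest b = b
          · have hx : x.2 = pvFmin rest b := by omega
            simp [h3, hx]
          · have hx : ¬ (x.2 = pvFmin rest b) := by
              have := hinit rest b; omega
            simp [h3, hx]
        · rw [if_neg h2, ih, hM]
          have hx : ¬ (x.2 = pvFmin rest b) := by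
            have := hinit rest b; omega
          simp [hx]

-- the two minima agree: seeding the min fold with max(0,max) gives the head score back
-- as the running state after the first step, because that seed is ≥ the head score
theorem pvMin_seed_eq (k : String) (s : Int) (rest : List (String × Int)) :
    pvFmin ((k, s) :: rest) (pvFmax ((k, s) :: rest) 0)
      = pvFmin rest s := by
  have hmax : s ≤ pvFmax ((k, s) :: rest) 0 :=
    pvFmax_ge_mem _ 0 (k, s) (List.mem_cons_self)
  simp only [pvFmin, List.foldl_cons]
  rcases eq_or_lt_of_le hmax with h | h
  · rw [if_neg (by omega), ← h]
  · rw [if_pos h]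

-- ===== VERDICT (by name: the statement is the Claim_ definition above) =====
theorem get_list_of_best_scores_spec : Claim_equal_get_list_of_best_scores := by
  intro candidates reverse _
  unfold Spec_get_list_of_best_scores get_list_of_best_scores get_list_of_best_scores_alt
  dsimp only
  cases reverse with
  | false =>
      have hm2 : (pv_min_max_score candidates false).2 = pvFmax candidates 0 := rfl
      rw [hm2]
      simp only [Bool.false_eq_true, if_false]
      rw [pvA_loop_eq candidates (pvFmax candidates 0) [], pvAltMaxLoop_eq candidates 0 []]
      simp
  | true =>
      have hm1 : (pv_min_max_score candidates true).1
          = pvFmin candidates (pvFmax candidates 0) := rfl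
      rw [hm1]
      simp only [reduceIte]
      cases candidates with
      | nil => rfl
      | cons x rest =>
          obtain ⟨k, s⟩ := x
          rw [pvA_loop_eq, pvMin_seed_eq k s rest]
          show _ = pvAltMinLoop rest (some s) [k]
          rw [pvAltMinLoop_eq]
          have hhead : pvFmin rest s ≤ s := pvFmin_le_init rest s
          simp only [List.filter_cons, List.nil_append]
          by_cases h : s = pvFmin rest s
          · simp [← h]
          · have h' : pvFmin rest s ≠ s := fun hh => h hh.symm
            simp [h, h']
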